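-- pv_equiv track=rewrite | github.com/merrcury7272/infaperevod10v11 | Шаблоны/з23_демо.py | f
-- ===== SOURCE A (Python) =====
-- def f(start, finish, komand=''):
--     if start == finish and komand.count('*') == 1:
--         return 1
--     if start > finish:
--         return 0
--     if komand.count('*') > 1:
--         return 0
--     return (f(start + 1, finish, komand + "+") +
--             f(start + 2, finish, komand + "+") +
--             f(start * 2, finish, komand + "*") +
--             f(start * 3, finish, komand + "*"))
-- ===== SOURCE B (Python) =====
-- def f(start, finish, komand=''):
--     # Memoized DP on (value, stars-used clamped to 2) instead of exploring
--     # every command string: the string only matters through its '*' count.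
--     memo = {}
--
--     def g(v, s):
--         if v == finish and s == 1:
--             return 1
--         if v > finish:
--             return 0
--         if s > 1:
--             return 0
--         key = (v, s)
--         if key not in memo:
--             t = min(s + 1, 2)
--             memo[key] = g(v + 1, s) + g(v + 2, s) + g(v * 2, t) + g(v * 3, t)
--         return memo[key]
--
--     return g(start, min(komand.count('*'), 2))
-- ===== Notes on version B (the rewrite author's own statement) =====
-- stated objective: alternative
-- what changed: B replaces A's recursive search over full command strings by a memoized DP keyed on (value, '*'-count clamped to 2), since the string only matters through its star count.
import Mathlib
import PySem

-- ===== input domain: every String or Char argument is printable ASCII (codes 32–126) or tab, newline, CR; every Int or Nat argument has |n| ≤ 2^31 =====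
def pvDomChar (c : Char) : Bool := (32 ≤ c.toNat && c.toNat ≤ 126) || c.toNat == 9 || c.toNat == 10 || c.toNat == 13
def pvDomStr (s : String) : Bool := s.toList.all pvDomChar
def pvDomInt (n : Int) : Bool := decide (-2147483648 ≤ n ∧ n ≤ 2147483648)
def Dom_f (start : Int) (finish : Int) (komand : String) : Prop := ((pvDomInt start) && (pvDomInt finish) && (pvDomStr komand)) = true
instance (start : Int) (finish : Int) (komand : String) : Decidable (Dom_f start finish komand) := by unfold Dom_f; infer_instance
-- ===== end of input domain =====

-- B replaces A's recursive search over command strings by memoized DP on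
-- (value, '*'-count clamped to 2); the return value is what is proved equal.

-- the ports' termination arguments cite these count lemmas by name
theorem count_go_single (c : Char) : ∀ (fuel : Nat) (cs : List Char) (acc : Nat),
    cs.length ≤ fuel → PySem.Chars.count.go [c] fuel cs acc = acc + cs.count c := by
  intro fuel
  induction fuel with
  | zero =>
    intro cs acc h
    have : cs = [] := List.eq_nil_of_length_eq_zero (Nat.le_zero.mp h)
    subst this
    simp [PySem.Chars.count.go]
  | succ n ih =>
    intro cs acc h
    cases cs with
    | nil => simp [PySem.Chars.count.go]
    | cons hd t =>
      rw [PySem.Chars.count.go]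
      by_cases hc : c = hd
      · subst hc
        simp only [List.isPrefixOf, BEq.rfl, Bool.true_and, if_true]
        rw [ih _ _ (by simpa using h)]
        simp
        omega
      · have hb : ([c].isPrefixOf (hd :: t)) = false := by
          simp [List.isPrefixOf, hc]
        rw [hb]
        simp only [if_false, Bool.false_eq_true]
        rw [ih _ _ (by simpa using Nat.le_of_succ_le_succ h)]
        have : ¬ (hd = c) := fun e => hc e.symm
        simp [this]

theorem chars_count_single (c : Char) (cs : List Char) :
    PySem.Chars.count cs [c] = cs.count c := by
  rw [PySem.Chars.count]
  simp only [List.isEmpty_cons, if_false, Bool.false_eq_true]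
  rw [count_go_single c cs.length cs 0 (le_refl _)]
  omega

theorem str_count_append_star (s : String) :
    PySem.Str.count (s ++ "*") "*" = PySem.Str.count s "*" + 1 := by
  simp [PySem.Str.count, chars_count_single, show ("*".toList = ['*']) from rfl]

theorem str_count_append_plus (s : String) :
    PySem.Str.count (s ++ "+") "*" = PySem.Str.count s "*" := by
  simp [PySem.Str.count, chars_count_single, show ("*".toList = ['*']) from rfl,
        show ("+".toList = ['+']) from rfl]

-- ===== PORT A =====
-- literal port of A; recursion terminates lexicographically on (stars budget, distance to finish)
def f (start : Int) (finish : Int) (komand : String) : Int :=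
  if start = finish ∧ PySem.Str.count komand "*" = 1 then 1
  else if start > finish then 0
  else if PySem.Str.count komand "*" > 1 then 0
  else f (start + 1) finish (komand ++ "+") + f (start + 2) finish (komand ++ "+")
     + f (start * 2) finish (komand ++ "*") + f (start * 3) finish (komand ++ "*")
termination_by ((2 - PySem.Str.count komand "*" : Int).toNat, (finish - start + 2).toNat)
decreasing_by
  · simp only [str_count_append_plus]
    exact Prod.Lex.right _ (by omega)
  · simp only [str_count_append_plus]
    exact Prod.Lex.right _ (by omega)
  · simp only [str_count_append_star]
    exact Prod.Lex.left _ _ (by omega)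
  · simp only [str_count_append_star]
    exact Prod.Lex.left _ _ (by omega)

-- ===== PORT B =====
-- literal port of B's memoized helper g (the memo is an evaluation cache; the value is this recursion)
def fAltGo (finish : Int) (v : Int) (s : Int) : Int :=
  if v = finish ∧ s = 1 then 1
  else if v > finish then 0
  else if s > 1 then 0
  else fAltGo finish (v + 1) s + fAltGo finish (v + 2) s
     + fAltGo finish (v * 2) (min (s + 1) 2) + fAltGo finish (v * 3) (min (s + 1) 2)
termination_by ((2 - s).toNat, (finish - v + 2).toNat)
decreasing_by
  · exact Prod.Lex.right _ (by omega)
  · exact Prod.Lex.right _ (by omega)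
  · exact Prod.Lex.left _ _ (by omega)
  · exact Prod.Lex.left _ _ (by omega)

def f_alt (start : Int) (finish : Int) (komand : String) : Int :=
  fAltGo finish start (min ((PySem.Str.count komand "*" : Int)) 2)

-- ===== PRECONDITION & SPEC =====
-- Pre_ excludes inputs with finish - start > 900: there the recursion depth of
-- Python A (and of B, which recurses on values the same way) exceeds CPython's
-- recursion limit and both raise RecursionError instead of returning.
def Pre_f (start : Int) (finish : Int) (komand : String) : Prop := finish - start ≤ 900
instance (start : Int) (finish : Int) (komand : String) : Decidable (Pre_f start finish komand) := by unfold Pre_f; infer_instance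
def pvWitness_f : Int × Int × String := (0, 5, "")

def Spec_f (start : Int) (finish : Int) (komand : String) (out : Int) : Prop := out = f_alt start finish komand
instance (start : Int) (finish : Int) (komand : String) (out : Int) : Decidable (Spec_f start finish komand out) := by unfold Spec_f; infer_instance

-- ===== CLAIM (what is proved, stated in full; the proofs are below) =====
def Claim_equal_f : Prop := ∀ (start : Int) (finish : Int) (komand : String), Dom_f start finish komand → Pre_f start finish komand → Spec_f start finish komand (f start finish komand)

-- ===== LEMMAS AND PROOFS =====

theorem f_main : ∀ (start finish : Int) (komand : String),
    f start finish komand = fAltGo finish start (min ((PySem.Str.count komand "*" : Int)) 2) := by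
  intro start finish komand
  refine f.induct finish
    (fun v k => f v finish k = fAltGo finish v (min ((PySem.Str.count k "*" : Int)) 2))
    ?_ ?_ ?_ ?_ start komand
  · intro start komand h1
    have hb1 : start = finish ∧ min ((PySem.Str.count komand "*" : Int)) 2 = 1 :=
      ⟨h1.1, by have := h1.2; omega⟩
    rw [f, fAltGo, if_pos h1, if_pos hb1]
  · intro start komand h1 h2
    have hb1 : ¬ (start = finish ∧ min ((PySem.Str.count komand "*" : Int)) 2 = 1) :=
      fun h => h1 ⟨h.1, by have := h.2; omega⟩
    rw [f, fAltGo, if_neg h1, if_neg hb1, if_pos h2, if_pos h2]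
  · intro start komand h1 h2 h3
    have hb1 : ¬ (start = finish ∧ min ((PySem.Str.count komand "*" : Int)) 2 = 1) :=
      fun h => h1 ⟨h.1, by have := h.2; omega⟩
    have hb3 : min ((PySem.Str.count komand "*" : Int)) 2 > 1 := by have := h3; omega
    rw [f, fAltGo, if_neg h1, if_neg hb1, if_neg h2, if_neg h2, if_pos h3, if_pos hb3]
  · intro start komand h1 h2 h3 ih1 ih2 ih3 ih4
    have hb1 : ¬ (start = finish ∧ min ((PySem.Str.count komand "*" : Int)) 2 = 1) :=
      fun h => h1 ⟨h.1, by have := h.2; omega⟩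
    have hb3 : ¬ min ((PySem.Str.count komand "*" : Int)) 2 > 1 := by have := h3; omega
    rw [f, fAltGo, if_neg h1, if_neg hb1, if_neg h2, if_neg h2, if_neg h3, if_neg hb3]
    simp only [str_count_append_plus, str_count_append_star] at ih1 ih2 ih3 ih4
    rw [ih1, ih2, ih3, ih4]
    have hm : min ((PySem.Str.count komand "*" + 1 : Nat) : Int) 2
        = min (min ((PySem.Str.count komand "*" : Int)) 2 + 1) 2 := by
      push_cast
      omega
    rw [hm]

-- ===== VERDICT (by name: the statement is the Claim_ definition above) =====
theorem f_spec : Claim_equal_f := by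
  intro start finish komand _ _
  unfold Spec_f f_alt
  exact f_main start finish komand
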